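-- pv_equiv track=rewrite | github.com/wareenpower/AutoCheck | script/part2_test1/Rocye_Part2_Test1.py | solution
-- ===== SOURCE A (Python) =====
-- def solution(src_str):
--     """
--     count character
--
--     :param src_str:
--     :return: [ num, {'character':count, ... }]
--     """
--     src_dic = {}
--
--     for char in src_str:
--         if not char.isalnum() and char != '_':
--             continue
--         if char in src_dic:
--             src_dic[char] = src_dic[char] + 1
--             continue
--         src_dic[char] = 1
--
--     return len(src_dic),src_dic
-- ===== SOURCE B (Python) =====
-- def solution(src_str):
--     # Filter once, dedup for first-occurrence key order, count each key per key.
--     filtered = [c for c in src_str if c.isalnum() or c == '_']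
--     keys = list(dict.fromkeys(filtered))
--     freq = {k: filtered.count(k) for k in keys}
--     return len(keys), freq
-- ===== Notes on version B (the rewrite author's own statement) =====
-- stated objective: alternative
-- what changed: Replaces the single-pass dict-update loop with a filter pass, an ordered dedup of the filtered chars, and a per-key count over the filtered list.
import Mathlib
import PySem

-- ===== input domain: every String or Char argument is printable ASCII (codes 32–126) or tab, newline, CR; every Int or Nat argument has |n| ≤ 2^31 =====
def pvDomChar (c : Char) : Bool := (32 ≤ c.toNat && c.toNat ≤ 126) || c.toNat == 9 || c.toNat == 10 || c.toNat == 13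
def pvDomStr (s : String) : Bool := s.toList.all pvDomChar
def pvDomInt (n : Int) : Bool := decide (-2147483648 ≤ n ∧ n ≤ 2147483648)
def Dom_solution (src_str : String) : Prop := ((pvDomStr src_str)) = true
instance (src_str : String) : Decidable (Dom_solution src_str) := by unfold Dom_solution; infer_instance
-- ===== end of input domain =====

-- B replaces A's single-pass dict-update loop with filter + ordered dedup + per-key count (alternative decomposition, same results).
-- ===== PORT A =====
def solution (src_str : String) : Int × (List (String × Int)) :=
  let d := src_str.toList.foldl (fun d c =>
    if ¬ (PySem.Chars.isalnum c) ∧ c ≠ '_' then d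
    else if d.contains c then d.insert c (d.getD c 0 + 1)
    else d.insert c 1) (PySem.Dict.empty : PySem.Dict Char Int)
  ((d.size : Int), d.items.map (fun p => (p.1.toString, p.2)))

-- ===== PORT B =====
def solution_alt (src_str : String) : Int × (List (String × Int)) :=
  let filtered := src_str.toList.filter (fun c => PySem.Chars.isalnum c || c == '_')
  let keys := PySem.List.dedup filtered
  let freq := keys.foldl (fun d k => d.insert k ((filtered.count k : Int)))
    (PySem.Dict.empty : PySem.Dict Char Int)
  ((keys.length : Int), freq.items.map (fun p => (p.1.toString, p.2)))

-- ===== PRECONDITION & SPEC =====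
def Spec_solution (src_str : String) (out : Int × (List (String × Int))) : Prop := out = solution_alt src_str
instance (src_str : String) (out : Int × (List (String × Int))) : Decidable (Spec_solution src_str out) := by unfold Spec_solution; infer_instance

-- ===== CLAIM (what is proved, stated in full; the proofs are below) =====
def Claim_equal_solution : Prop := ∀ (src_str : String), Dom_solution src_str → Spec_solution src_str (solution src_str)

-- ===== LEMMAS AND PROOFS =====

-- ===== VERDICT (by name: the statement is the Claim_ definition above) =====
-- A's loop body, on every char, equals the Counter update.
lemma body_eq (d : PySem.Dict Char Int) (c : Char) :
    (if ¬ (PySem.Chars.isalnum c) ∧ c ≠ '_' then d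
     else if d.contains c then d.insert c (d.getD c 0 + 1)
     else d.insert c 1)
    = if (PySem.Chars.isalnum c || c == '_') then d.insert c (d.getD c 0 + 1) else d := by
  by_cases h : PySem.Chars.isalnum c ∨ c = '_'
  · have hb : (PySem.Chars.isalnum c || c == '_') = true := by
      rcases h with h | h <;> simp [h]
    rw [if_pos hb, if_neg (show ¬ (¬ PySem.Chars.isalnum c = true ∧ c ≠ '_') by
      rcases h with h | h
      · simp [h]
      · simp [h])]
    by_cases hc : d.contains c
    · rw [if_pos hc]
    · rw [if_neg hc, PySem.Dict.getD_of_not_contains d 0 (by by_contra hx; exact hc (by simpa using hx))]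
      norm_num
  · push Not at h
    have hb : (PySem.Chars.isalnum c || c == '_') = false := by simp [h.1, h.2]
    rw [if_pos (show (¬ PySem.Chars.isalnum c = true ∧ c ≠ '_') from ⟨h.1, h.2⟩),
      if_neg (by simp [hb])]

lemma a_dict_eq (l : List Char) :
    l.foldl (fun d c =>
      if ¬ (PySem.Chars.isalnum c) ∧ c ≠ '_' then d
      else if d.contains c then d.insert c (d.getD c 0 + 1)
      else d.insert c 1) (PySem.Dict.empty : PySem.Dict Char Int)
    = PySem.Dict.counter (l.filter (fun c => PySem.Chars.isalnum c || c == '_')) := by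
  rw [PySem.List.foldl_congr_mem l _
      (fun d c => if (PySem.Chars.isalnum c || c == '_') then d.insert c (d.getD c 0 + 1) else d)
      _ (fun acc x _ => body_eq acc x),
    PySem.List.foldl_if_eq_foldl_filter,
    PySem.Dict.foldl_insert_getD_add_one_eq_counter]

-- ===== VERDICT (by name: the statement is the Claim_ definition above) =====
theorem solution_spec : Claim_equal_solution := by
  intro s _
  unfold Spec_solution solution solution_alt
  rw [a_dict_eq]
  set fl := s.toList.filter (fun c => PySem.Chars.isalnum c || c == '_') with hfl
  have hkeys : PySem.List.dedup fl = PySem.Set.ofList fl := PySem.List.dedup_eq_ofList fl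
  have hfresh : ((PySem.List.dedup fl).foldl
      (fun d k => d.insert k ((fl.count k : Int))) (PySem.Dict.empty : PySem.Dict Char Int)).items
      = (PySem.List.dedup fl).map (fun k => (k, (fl.count k : Int))) := by
    have h := PySem.Dict.items_foldl_insert_fresh (PySem.List.dedup fl) (fun k => k)
      (fun k => (fl.count k : Int)) (PySem.Dict.empty : PySem.Dict Char Int)
      (fun a _ => by simp [PySem.Dict.contains_empty])
      (by simpa [hkeys, List.map_id] using PySem.Set.nodup_ofList fl)
    simpa using h
  have hitems : (PySem.Dict.counter fl).items
      = (PySem.Set.ofList fl).map (fun k => (k, (fl.count k : Int))) :=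
    PySem.Dict.items_counter fl
  rw [hkeys] at hfresh
  simp only [hkeys, hfresh, hitems, PySem.Dict.size, List.length_map]
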